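-- pv_equiv track=rewrite | github.com/ceglab/MissingSquamateGenes | testMSA/ortholog_divergence_report.py | longest_contiguous_identity
-- ===== SOURCE A (Python) =====
-- def longest_contiguous_identity(aa_aln_q, aa_aln_t):
--     cur = best = 0
--     for i in range(len(aa_aln_q)):
--         if aa_aln_q[i] == aa_aln_t[i] and aa_aln_q[i] != "-":
--             cur += 1; best = max(best, cur)
--         else:
--             cur = 0
--     return best
-- ===== SOURCE B (Python) =====
-- from itertools import groupby
--
-- def longest_contiguous_identity(aa_aln_q, aa_aln_t):
--     m = [aa_aln_q[i] == aa_aln_t[i] and aa_aln_q[i] != "-" for i in range(len(aa_aln_q))]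
--     return max((sum(1 for _ in g) for k, g in groupby(m) if k), default=0)
-- ===== Notes on version B (the rewrite author's own statement) =====
-- stated objective: idiomatic
-- what changed: Instead of threading a running counter and best through one loop, B first builds the boolean match table and then takes the maximum length of a consecutive True group via itertools.groupby.
import Mathlib
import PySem

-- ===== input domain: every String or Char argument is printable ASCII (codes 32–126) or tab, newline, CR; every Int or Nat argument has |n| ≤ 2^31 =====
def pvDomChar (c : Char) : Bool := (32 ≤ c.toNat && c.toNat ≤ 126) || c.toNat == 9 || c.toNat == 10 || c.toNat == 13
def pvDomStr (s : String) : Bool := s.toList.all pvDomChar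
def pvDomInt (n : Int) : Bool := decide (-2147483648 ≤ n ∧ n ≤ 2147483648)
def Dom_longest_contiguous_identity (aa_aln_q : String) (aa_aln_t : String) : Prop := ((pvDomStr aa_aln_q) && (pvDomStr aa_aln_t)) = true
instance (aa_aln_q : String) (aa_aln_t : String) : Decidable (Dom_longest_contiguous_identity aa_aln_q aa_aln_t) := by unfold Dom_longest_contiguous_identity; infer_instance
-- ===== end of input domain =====

-- B replaces the counter-threading loop by building the boolean match table and taking
-- the longest consecutive True group (itertools.groupby); same O(n) cost, more idiomatic.


-- ===== PORT A =====
-- A's loop 'for i in range(len(q))' threading (cur, best); the two indexed reads q[i], t[i]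
-- are rendered as a parallel walk of the two character lists (identical values under Pre_,
-- where every index is in range; headD's default is never consulted there).
def pvLoopA : List Char → List Char → (Int × Int) → (Int × Int)
  | [], _, s => s
  | qc :: qs', ts, s =>
      pvLoopA qs' ts.tail
        (if qc = ts.headD ' ' ∧ qc ≠ '-' then (s.1 + 1, max s.2 (s.1 + 1)) else (0, s.2))

def longest_contiguous_identity (aa_aln_q : String) (aa_aln_t : String) : Int :=
  (pvLoopA aa_aln_q.toList aa_aln_t.toList ((0 : Int), (0 : Int))).2

-- ===== PORT B =====
-- the boolean match table m of Source B (q[i], t[i] again read by a parallel walk)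
def pvMatchTbl : List Char → List Char → List Bool
  | [], _ => []
  | qc :: qs', ts => (qc == ts.headD ' ' && qc != '-') :: pvMatchTbl qs' ts.tail

-- itertools.groupby: consecutive groups with their lengths (sum(1 for _ in g))
def pvGroupRuns : List Bool → List (Bool × Int)
  | [] => []
  | x :: xs =>
      (x, 1 + (xs.takeWhile (· == x)).length) :: pvGroupRuns (xs.dropWhile (· == x))
termination_by m => m.length
decreasing_by
  simpa using Nat.lt_succ_of_le (List.length_dropWhile_le (· == x) xs)

-- max((… for k, g in groupby(m) if k), default=0)
def longest_contiguous_identity_alt (aa_aln_q : String) (aa_aln_t : String) : Int :=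
  ((pvGroupRuns (pvMatchTbl aa_aln_q.toList aa_aln_t.toList)).filterMap
      (fun p => if p.1 then some p.2 else none)).foldl max 0

-- ===== PRECONDITION & SPEC =====
-- Pre_ excludes only the inputs where A raises IndexError (query longer than target).
def Pre_longest_contiguous_identity (aa_aln_q : String) (aa_aln_t : String) : Prop :=
  aa_aln_q.toList.length ≤ aa_aln_t.toList.length
instance (aa_aln_q : String) (aa_aln_t : String) : Decidable (Pre_longest_contiguous_identity aa_aln_q aa_aln_t) := by unfold Pre_longest_contiguous_identity; infer_instance

def pvWitness_longest_contiguous_identity : String × String := ("AB-A", "ABCA")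

def Spec_longest_contiguous_identity (aa_aln_q : String) (aa_aln_t : String) (out : Int) : Prop := out = longest_contiguous_identity_alt aa_aln_q aa_aln_t
instance (aa_aln_q : String) (aa_aln_t : String) (out : Int) : Decidable (Spec_longest_contiguous_identity aa_aln_q aa_aln_t out) := by unfold Spec_longest_contiguous_identity; infer_instance

-- ===== CLAIM (what is proved, stated in full; the proofs are below) =====
def Claim_equal_longest_contiguous_identity : Prop := ∀ (aa_aln_q : String) (aa_aln_t : String), Dom_longest_contiguous_identity aa_aln_q aa_aln_t → Pre_longest_contiguous_identity aa_aln_q aa_aln_t → Spec_longest_contiguous_identity aa_aln_q aa_aln_t (longest_contiguous_identity aa_aln_q aa_aln_t)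

-- ===== LEMMAS AND PROOFS =====

-- the step of A's fold, as a function of the match bit
def pvStep (s : Int × Int) (x : Bool) : Int × Int :=
  if x then (s.1 + 1, max s.2 (s.1 + 1)) else (0, s.2)

-- "longest run, with a pending current run of length c"
def pvG : Int → List Bool → Int
  | c, [] => c
  | c, true :: xs => pvG (c + 1) xs
  | c, false :: xs => max c (pvG 0 xs)

theorem pvG_ge (m : List Bool) : ∀ c : Int, c ≤ pvG c m := by
  induction m with
  | nil => intro c; simp [pvG]
  | cons x xs ih =>
      intro c
      cases x with
      | true => exact le_trans (by omega) (ih (c + 1))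
      | false => simp [pvG]

theorem pvFold_eq (m : List Bool) : ∀ c b : Int, 0 ≤ c → c ≤ b →
    (m.foldl pvStep (c, b)).2 = max b (pvG c m) := by
  induction m with
  | nil => intro c b h0 h; simp [pvG]; omega
  | cons x xs ih =>
      intro c b h0 h
      cases x with
      | true =>
          have hs : pvStep (c, b) true = (c + 1, max b (c + 1)) := by simp [pvStep]
          rw [List.foldl_cons, hs, ih (c + 1) (max b (c + 1)) (by omega) (le_max_right _ _)]
          simp only [pvG]
          have := pvG_ge xs (c + 1)
          omega
      | false =>
          have hs : pvStep (c, b) false = (0, b) := by simp [pvStep]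
          rw [List.foldl_cons, hs, ih 0 b le_rfl (by omega)]
          simp only [pvG]
          omega

theorem pvFoldMax_cons (L : List Int) : ∀ a b : Int,
    L.foldl max (max a b) = max a (L.foldl max b) := by
  induction L with
  | nil => intro a b; simp
  | cons x xs ih =>
      intro a b
      simp only [List.foldl_cons]
      rw [max_assoc, ih]

def pvAlt (m : List Bool) : Int :=
  ((pvGroupRuns m).filterMap (fun p => if p.1 then some p.2 else none)).foldl max 0

theorem pvG_nonneg (m : List Bool) : 0 ≤ pvG 0 m := pvG_ge m 0

theorem pvG_true_run (k : ℕ) : ∀ (c : Int) (rest : List Bool),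
    pvG c (List.replicate k true ++ rest) = pvG (c + k) rest := by
  induction k with
  | zero => intro c rest; simp
  | succ n ih =>
      intro c rest
      simp only [List.replicate_succ, List.cons_append, pvG]
      rw [ih]
      congr 1
      omega

theorem pvTakeWhile_replicate {x : Bool} (xs : List Bool) :
    xs.takeWhile (· == x) = List.replicate (xs.takeWhile (· == x)).length x := by
  induction xs with
  | nil => simp
  | cons y ys ih =>
      by_cases h : y = x
      · subst h; simp only [List.takeWhile_cons, beq_self_eq_true]
        simp [List.replicate_succ, ← ih]
      · simp [h]

theorem pvAlt_eq_G (m : List Bool) : pvAlt m = pvG 0 m := by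
  induction m using pvGroupRuns.induct with
  | case1 => simp [pvAlt, pvGroupRuns, pvG]
  | case2 x xs ih =>
      have hsplit : xs.takeWhile (· == x) ++ xs.dropWhile (· == x) = xs :=
        List.takeWhile_append_dropWhile
      set k := (xs.takeWhile (· == x)).length with hk
      set rest := xs.dropWhile (· == x) with hrest
      have hx : x :: xs = List.replicate (k + 1) x ++ rest := by
        rw [List.replicate_succ, List.cons_append]
        congr 1
        rw [← hsplit]
        congr 1
        exact pvTakeWhile_replicate xs
      cases x with
      | true =>
          have halt : pvAlt (true :: xs) =
              ((1 + (k : Int)) ::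
                (pvGroupRuns rest).filterMap
                  (fun p => if p.1 then some p.2 else none)).foldl max 0 := by
            simp only [pvAlt, pvGroupRuns, List.filterMap_cons]
            rfl
          rw [halt, List.foldl_cons, max_comm (0 : Int) (1 + (k : Int)), pvFoldMax_cons]
          have hrw : ((pvGroupRuns rest).filterMap
              (fun p => if p.1 then some p.2 else none)).foldl max 0 = pvG 0 rest := ih
          rw [hrw, hx, pvG_true_run]
          have h1 : (0 : Int) + ((k + 1 : ℕ) : Int) = 1 + (k : Int) := by push_cast; omega
          rw [h1]
          cases hr : rest with
          | nil => simp [pvG]; omega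
          | cons y ys =>
              have hy : y = false := by
                have h2 := List.head?_dropWhile_not (· == true) xs
                rw [← hrest, hr] at h2
                simpa using h2
              subst hy
              simp only [pvG]
              have := pvG_nonneg ys
              omega
      | false =>
          have halt : pvAlt (false :: xs) = pvAlt rest := by
            simp only [pvAlt, pvGroupRuns, List.filterMap_cons]
            rfl
          rw [halt, ih, hx]
          have hfr : ∀ (j : ℕ) (r : List Bool),
              pvG 0 (List.replicate j false ++ r) = pvG 0 r := by
            intro j
            induction j with
            | zero => intro r; simp
            | succ n ihj =>
                intro r
                simp only [List.replicate_succ, List.cons_append, pvG, ihj]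
                have := pvG_nonneg r
                omega
          rw [hfr]

-- A's loop equals the pvStep-fold over the match table
theorem pvA_eq_fold (qs ts : List Char) : ∀ s : Int × Int,
    pvLoopA qs ts s = (pvMatchTbl qs ts).foldl pvStep s := by
  induction qs generalizing ts with
  | nil => intro s; rfl
  | cons qc qs' ih =>
      intro s
      rw [pvLoopA, pvMatchTbl, List.foldl_cons, ← ih]
      congr 1
      simp only [pvStep]
      by_cases h : qc = ts.headD ' ' ∧ qc ≠ '-'
      · rw [if_pos h, if_pos (by simp only [Bool.and_eq_true, beq_iff_eq, bne_iff_ne]; exact ⟨h.1, h.2⟩)]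
      · rw [if_neg h, if_neg ?_]
        simp only [Bool.and_eq_true, beq_iff_eq, bne_iff_ne, ne_eq]
        tauto

-- ===== VERDICT (by name: the statement is the Claim_ definition above) =====
theorem longest_contiguous_identity_spec : Claim_equal_longest_contiguous_identity := by
  intro q t _ _
  unfold Spec_longest_contiguous_identity
  show longest_contiguous_identity q t = longest_contiguous_identity_alt q t
  unfold longest_contiguous_identity
  rw [pvA_eq_fold]
  rw [pvFold_eq (pvMatchTbl q.toList t.toList) 0 0 le_rfl le_rfl]
  have h2 : longest_contiguous_identity_alt q t = pvAlt (pvMatchTbl q.toList t.toList) := rfl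
  rw [h2, pvAlt_eq_G]
  have := pvG_nonneg (pvMatchTbl q.toList t.toList)
  omega
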